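-- pv_equiv track=rewrite | github.com/wannabetter/LeetCode | 2562.py | findTheArrayConcVal
-- ===== SOURCE A (Python) =====
-- from typing import List
--
-- def findTheArrayConcVal(nums: List[int]) -> int:
--     ans = 0
--     left, right = 0, len(nums) - 1
--     while left <= right:
--         if left == right:
--             ans += nums[left]
--         else:
--             ans += int(str(nums[left]) + str(nums[right]))
--         left += 1
--         right -= 1
--     return ans
-- ===== SOURCE B (Python) =====
-- def findTheArrayConcVal(nums):
--     if len(nums) < 2:
--         return sum(nums)
--     first, *middle, last = nums
--     return int(str(first) + str(last)) + findTheArrayConcVal(middle)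
-- ===== Notes on version B (the rewrite author's own statement) =====
-- stated objective: simpler
-- what changed: Replaces A's iterative two-pointer index walk with structural recursion on the list itself: destructure it as first, *middle, last, add the concatenation of the outer pair and recurse on the middle, with sum(nums) as the base case for lists of length < 2; no indices or loop state at all. Pre_ excludes only inputs where A raises ValueError (a negative number in the tail half makes int(str(a)+str(b)) unparseable).
import Mathlib
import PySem

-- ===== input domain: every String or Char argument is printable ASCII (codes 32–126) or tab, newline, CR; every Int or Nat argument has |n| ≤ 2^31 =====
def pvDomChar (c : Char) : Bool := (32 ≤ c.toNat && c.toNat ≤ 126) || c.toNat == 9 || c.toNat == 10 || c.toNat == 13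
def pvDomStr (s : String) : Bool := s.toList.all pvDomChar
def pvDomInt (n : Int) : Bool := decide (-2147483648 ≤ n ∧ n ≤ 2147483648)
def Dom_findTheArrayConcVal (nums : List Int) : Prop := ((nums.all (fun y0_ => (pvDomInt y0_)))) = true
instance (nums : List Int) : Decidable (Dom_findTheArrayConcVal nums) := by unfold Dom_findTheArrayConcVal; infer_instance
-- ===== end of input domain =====

-- B replaces A's iterative two-pointer index walk with structural recursion on the list:
-- destructure first, *middle, last, add the outer pair's concatenation and recurse on the
-- middle, with sum for lists of length < 2 (objective: simpler).

-- ===== PORT A =====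
-- int(str(a) + str(b)); inside Pre_ the parse always succeeds, so .getD 0 is never taken
def pvConc (a b : Int) : Int :=
  (PySem.Int.ofChars? (PySem.Int.toChars a ++ PySem.Int.toChars b)).getD 0

-- the while-loop of A: state (left, right, ans)
def pvLoopA (nums : List Int) (left right ans : Int) : Int :=
  if _h : left ≤ right then
    if left = right then
      pvLoopA nums (left + 1) (right - 1) (ans + (PySem.List.pyGet? nums left).getD 0)
    else
      pvLoopA nums (left + 1) (right - 1)
        (ans + pvConc ((PySem.List.pyGet? nums left).getD 0) ((PySem.List.pyGet? nums right).getD 0))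
  else ans
termination_by (right + 1 - left).toNat
decreasing_by all_goals omega

def findTheArrayConcVal (nums : List Int) : Int :=
  pvLoopA nums 0 ((nums.length : Int) - 1) 0

-- ===== PORT B =====
-- B's recursion: 'first, *middle, last = nums' is head / tail.dropLast / last; base case sum(nums)
def findTheArrayConcVal_alt (nums : List Int) : Int :=
  if _h : 2 ≤ nums.length then
    pvConc nums.headI nums.getLastI + findTheArrayConcVal_alt nums.tail.dropLast
  else
    nums.sum
termination_by nums.length
decreasing_by simp [List.length_dropLast, List.length_tail]; omega

-- ===== PRECONDITION & SPEC =====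
-- Pre_ excludes exactly the inputs on which Python A (and B) raises ValueError: a negative
-- element in the tail half makes int(str(nums[left]) + str(nums[right])) parse a string like "3-5".
def Pre_findTheArrayConcVal (nums : List Int) : Prop :=
  ∀ x ∈ nums.drop ((nums.length + 1) / 2), 0 ≤ x
instance (nums : List Int) : Decidable (Pre_findTheArrayConcVal nums) := by
  unfold Pre_findTheArrayConcVal; infer_instance

def pvWitness_findTheArrayConcVal : List Int := [-7, 52, 2, 4]

def Spec_findTheArrayConcVal (nums : List Int) (out : Int) : Prop := out = findTheArrayConcVal_alt nums
instance (nums : List Int) (out : Int) : Decidable (Spec_findTheArrayConcVal nums out) := by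
  unfold Spec_findTheArrayConcVal; infer_instance

-- ===== CLAIM (what is proved, stated in full; the proofs are below) =====
def Claim_equal_findTheArrayConcVal : Prop := ∀ (nums : List Int), Dom_findTheArrayConcVal nums → Pre_findTheArrayConcVal nums → Spec_findTheArrayConcVal nums (findTheArrayConcVal nums)

-- ===== LEMMAS AND PROOFS =====

-- the accumulator of A's loop factors out
lemma loopA_acc : ∀ (k : Nat) (nums : List Int) (i j c : Int), (j + 1 - i).toNat ≤ k →
    pvLoopA nums i j c = c + pvLoopA nums i j 0 := by
  intro k
  induction k with
  | zero =>
    intro nums i j c hk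
    conv_lhs => rw [pvLoopA]
    conv_rhs => rw [pvLoopA]
    rw [dif_neg (by omega), dif_neg (by omega)]
    ring
  | succ k ih =>
    intro nums i j c hk
    by_cases hij : i ≤ j
    · conv_lhs => rw [pvLoopA]
      conv_rhs => rw [pvLoopA]
      rw [dif_pos hij, dif_pos hij]
      split_ifs with h
      · rw [ih nums (i+1) (j-1) _ (by omega), ih nums (i+1) (j-1) (0 + _) (by omega)]
        ring
      · rw [ih nums (i+1) (j-1) _ (by omega), ih nums (i+1) (j-1) (0 + _) (by omega)]
        ring
    · conv_lhs => rw [pvLoopA]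
      conv_rhs => rw [pvLoopA]
      rw [dif_neg hij, dif_neg hij]
      ring

lemma pyGet_shift (x y : Int) (l : List Int) (i : Int) (h0 : 0 ≤ i) (h1 : i < (l.length : Int)) :
    PySem.List.pyGet? (x :: (l ++ [y])) (i + 1) = PySem.List.pyGet? l i := by
  obtain ⟨a, rfl⟩ := Int.eq_ofNat_of_zero_le h0
  have ha : a < l.length := by exact_mod_cast h1
  have h2 : ((a : Int) + 1) = ((a + 1 : Nat) : Int) := by push_cast; ring
  rw [h2]
  simp [pysem, List.getElem?_append_left ha]

-- stripping the outer pair shifts A's loop onto the inner list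
lemma loopA_shift : ∀ (k : Nat) (x y : Int) (l : List Int) (i j ans : Int),
    (j + 1 - i).toNat ≤ k → 0 ≤ i → j < (l.length : Int) →
    pvLoopA (x :: (l ++ [y])) (i + 1) (j + 1) ans = pvLoopA l i j ans := by
  intro k
  induction k with
  | zero =>
    intro x y l i j ans hk h0 h1
    conv_lhs => rw [pvLoopA]
    conv_rhs => rw [pvLoopA]
    rw [dif_neg (by omega), dif_neg (by omega)]
  | succ k ih =>
    intro x y l i j ans hk h0 h1
    by_cases hij : i ≤ j
    · conv_lhs => rw [pvLoopA]
      conv_rhs => rw [pvLoopA]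
      rw [dif_pos (by omega : i + 1 ≤ j + 1), dif_pos hij]
      have e1 : j + 1 - 1 = (j - 1) + 1 := by ring
      split_ifs with h h' h'
      · rw [pyGet_shift x y l i h0 (by omega)]
        rw [e1]
        exact ih x y l (i+1) (j-1) _ (by omega) (by omega) (by omega)
      · exact absurd (by omega : i = j) h'
      · exact absurd (by omega : i + 1 = j + 1) h
      · rw [pyGet_shift x y l i h0 (by omega), pyGet_shift x y l j (by omega) h1]
        rw [e1]
        exact ih x y l (i+1) (j-1) _ (by omega) (by omega) (by omega)
    · conv_lhs => rw [pvLoopA]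
      conv_rhs => rw [pvLoopA]
      rw [dif_neg (by omega), dif_neg hij]

lemma a_step (x y : Int) (l : List Int) :
    findTheArrayConcVal (x :: (l ++ [y])) = pvConc x y + findTheArrayConcVal l := by
  rw [findTheArrayConcVal, findTheArrayConcVal]
  have hlen : (((x :: (l ++ [y])).length : Int)) - 1 = (l.length : Int) + 1 := by
    simp
  rw [hlen]
  conv_lhs => rw [pvLoopA]
  rw [dif_pos (by omega : (0:Int) ≤ (l.length : Int) + 1), if_neg (by omega : ¬ (0:Int) = (l.length : Int) + 1)]
  have g0 : (PySem.List.pyGet? (x :: (l ++ [y])) 0).getD 0 = x := by simp [pysem]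
  have gl : (PySem.List.pyGet? (x :: (l ++ [y])) ((l.length : Int) + 1)).getD 0 = y := by
    have h2 : ((l.length : Int) + 1) = ((l.length + 1 : Nat) : Int) := by push_cast; ring
    rw [h2]
    simp [pysem]
  rw [g0, gl]
  have e1 : (l.length : Int) + 1 - 1 = ((l.length : Int) - 1) + 1 := by ring
  rw [e1]
  rw [loopA_shift l.length x y l 0 ((l.length : Int) - 1) _ (by omega) le_rfl (by omega)]
  rw [loopA_acc l.length l 0 ((l.length : Int) - 1) _ (by omega)]
  ring

lemma b_step (x y : Int) (l : List Int) :
    findTheArrayConcVal_alt (x :: (l ++ [y])) = pvConc x y + findTheArrayConcVal_alt l := by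
  rw [findTheArrayConcVal_alt]
  rw [dif_pos (by simp)]
  have h1 : (x :: (l ++ [y])).headI = x := rfl
  have h2 : (x :: (l ++ [y])).getLastI = y := by
    rw [List.getLastI_eq_getLast?_getD]
    rw [show x :: (l ++ [y]) = (x :: l) ++ [y] from rfl, List.getLast?_concat]
    rfl
  have h3 : (x :: (l ++ [y])).tail.dropLast = l := by
    simp
  rw [h1, h2, h3]

lemma main_eq (nums : List Int) : findTheArrayConcVal nums = findTheArrayConcVal_alt nums := by
  induction nums using List.bidirectionalRec with
  | nil =>
    rw [findTheArrayConcVal, findTheArrayConcVal_alt]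
    conv_lhs => rw [pvLoopA]
    rw [dif_neg (by simp)]
    rw [dif_neg (by simp)]
    simp
  | singleton a =>
    rw [findTheArrayConcVal, findTheArrayConcVal_alt]
    have h1 : (([a] : List Int).length : Int) - 1 = 0 := by simp
    rw [h1]
    conv_lhs => rw [pvLoopA]
    rw [dif_pos le_rfl, if_pos rfl]
    conv_lhs => rw [pvLoopA]
    rw [dif_neg (by omega)]
    rw [dif_neg (by simp)]
    simp [pysem]
  | cons_append x l y ih =>
    rw [a_step, b_step, ih]

-- ===== VERDICT (by name: the statement is the Claim_ definition above) =====
theorem findTheArrayConcVal_spec : Claim_equal_findTheArrayConcVal := by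
  intro nums _ _
  exact main_eq nums
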